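-- pv_equiv track=rewrite | github.com/Specht1000/Crossword-AI | src/grid.py | find_max_word_length_and_existing_letters
-- ===== SOURCE A (Python) =====
-- from typing import List, Tuple, Dict
--
-- def find_max_word_length_and_existing_letters(grid: List[List[str]], row: int, col: int, direction: str) -> Tuple[int, Dict[int, str]]:
--     max_length: int = 0
--     existing_letters: Dict[int, str] = {}
--
--     if direction == 'H':  # Direção horizontal
--         while col + max_length < len(grid[0]) and grid[row][col + max_length] != '.':
--             if grid[row][col + max_length] != '?':  # Captura letras já presentes
--                 existing_letters[max_length] = grid[row][col + max_length]
--             max_length += 1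
--     elif direction == 'V':  # Direção vertical
--         while row + max_length < len(grid) and grid[row + max_length][col] != '.':
--             if grid[row + max_length][col] != '?':
--                 existing_letters[max_length] = grid[row + max_length][col]
--             max_length += 1
--
--     return max_length, existing_letters
-- ===== SOURCE B (Python) =====
-- def find_max_word_length_and_existing_letters(grid, row, col, direction):
--     # Extract the scanned ray first, then one uniform stop-at-'.' pass over it.
--     if direction == 'H':
--         ray = grid[row][col:len(grid[0])]
--     elif direction == 'V':
--         ray = [grid[r][col] for r in range(row, len(grid))]
--     else:
--         return 0, {}
--     max_length = 0
--     existing_letters = {}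
--     for i, c in enumerate(ray):
--         if c == '.':
--             break
--         if c != '?':
--             existing_letters[i] = c
--         max_length += 1
--     return max_length, existing_letters
-- ===== Notes on version B (the rewrite author's own statement) =====
-- stated objective: simpler
-- what changed: B first extracts the scanned ray (a row slice bounded by len(grid[0]) for 'H', a column comprehension for 'V') and then runs one uniform enumerate loop that stops at '.', replacing A's two direction-specific index-arithmetic while loops.
-- outside the precondition, e.g. on find_max_word_length_and_existing_letters([['a', 'b']], 0, -1, 'H'): A returns (3, {0: 'b', 1: 'a', 2: 'b'}), B returns (1, {0: 'b'}); on find_max_word_length_and_existing_letters([['a', '.'], ['b']], 0, 1, 'V'): A returns (0, {}), B raises IndexError; on find_max_word_length_and_existing_letters([['a']], 5, 1, 'H'): A returns (0, {}), B raises IndexError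
import Mathlib
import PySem

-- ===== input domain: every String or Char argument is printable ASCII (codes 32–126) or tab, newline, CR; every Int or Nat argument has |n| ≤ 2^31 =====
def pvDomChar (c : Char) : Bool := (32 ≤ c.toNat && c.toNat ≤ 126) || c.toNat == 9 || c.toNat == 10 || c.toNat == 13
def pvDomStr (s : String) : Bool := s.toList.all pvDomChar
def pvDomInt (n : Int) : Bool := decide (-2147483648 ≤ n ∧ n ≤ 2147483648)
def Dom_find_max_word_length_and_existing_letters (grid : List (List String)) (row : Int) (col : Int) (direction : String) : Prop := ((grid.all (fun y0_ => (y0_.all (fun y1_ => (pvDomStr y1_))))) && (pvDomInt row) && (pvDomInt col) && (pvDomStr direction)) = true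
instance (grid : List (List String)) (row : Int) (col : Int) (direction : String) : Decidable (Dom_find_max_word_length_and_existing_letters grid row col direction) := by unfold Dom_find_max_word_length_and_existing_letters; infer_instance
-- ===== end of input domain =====

-- B extracts the scanned ray (a row slice for 'H', a column comprehension for 'V') and runs one
-- uniform stop-at-'.' scan over it, replacing A's two index-arithmetic while loops (objective: simpler).

-- ===== PORT A =====
-- grid[r][c] with Python indexing (negative wrap; none = IndexError)
def pvCell (grid : List (List String)) (r c : Int) : Option String :=
  (PySem.List.pyGet? grid r).bind (fun rw => PySem.List.pyGet? rw c)

-- the 'H' while loop; fuel makes the recursion total (enough fuel is supplied under Pre_)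
def pvLoopH (grid : List (List String)) (row col : Int) :
    Nat → Int → PySem.Dict Int String → Int × PySem.Dict Int String
  | 0, m, d => (m, d)
  | fuel+1, m, d =>
    if col + m < ((grid.headD []).length : Int) then
      match pvCell grid row (col + m) with
      | none => (m, d)  -- Python raises IndexError here (outside Pre_)
      | some c =>
        if c ≠ "." then
          pvLoopH grid row col fuel (m + 1) (if c ≠ "?" then d.insert m c else d)
        else (m, d)
    else (m, d)

-- the 'V' while loop
def pvLoopV (grid : List (List String)) (row col : Int) :
    Nat → Int → PySem.Dict Int String → Int × PySem.Dict Int String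
  | 0, m, d => (m, d)
  | fuel+1, m, d =>
    if row + m < (grid.length : Int) then
      match pvCell grid (row + m) col with
      | none => (m, d)  -- Python raises IndexError here (outside Pre_)
      | some c =>
        if c ≠ "." then
          pvLoopV grid row col fuel (m + 1) (if c ≠ "?" then d.insert m c else d)
        else (m, d)
    else (m, d)

def find_max_word_length_and_existing_letters (grid : List (List String)) (row : Int) (col : Int) (direction : String) : Int × (List (Int × String)) :=
  if direction = "H" then
    let r := pvLoopH grid row col ((grid.headD []).length + 1) 0 PySem.Dict.empty
    (r.1, r.2.items)
  else if direction = "V" then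
    let r := pvLoopV grid row col (grid.length + 1) 0 PySem.Dict.empty
    (r.1, r.2.items)
  else (0, [])

-- ===== PORT B =====
-- one uniform scan over the extracted ray: stop at '.', record non-'?' letters at their offset
def pvScanRay : List String → Int → PySem.Dict Int String → Int × PySem.Dict Int String
  | [], m, d => (m, d)
  | c :: rest, m, d =>
    if c = "." then (m, d)
    else pvScanRay rest (m + 1) (if c ≠ "?" then d.insert m c else d)

def find_max_word_length_and_existing_letters_alt (grid : List (List String)) (row : Int) (col : Int) (direction : String) : Int × (List (Int × String)) :=
  if direction = "H" then
    match PySem.List.pyGet? grid row with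
    | none => (0, [])  -- Python raises IndexError here (outside Pre_)
    | some rowl =>
      let ray := PySem.List.slice rowl (some col) (some ((grid.headD []).length : Int))
      let r := pvScanRay ray 0 PySem.Dict.empty
      (r.1, r.2.items)
  else if direction = "V" then
    -- [grid[r][col] for r in range(row, len(grid))]; a none is an IndexError (outside Pre_)
    let ray := ((PySem.List.pyRange row grid.length 1).map
        (fun r => (PySem.List.pyGet? grid r).bind (fun rw => PySem.List.pyGet? rw col))).filterMap id
    let r := pvScanRay ray 0 PySem.Dict.empty
    (r.1, r.2.items)
  else (0, [])

-- ===== PRECONDITION & SPEC =====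
-- Pre_ restricts the H/V scans to the natural domain: for 'H' a non-negative in-range row, a
-- non-negative col and a scanned row at least as wide as grid[0]; for 'V' a non-negative row and
-- col a valid Python index into every row from `row` down.  This excludes the inputs where A (or
-- the ray comprehension of B) raises IndexError and the negative-index wraparound corners.
def Pre_find_max_word_length_and_existing_letters (grid : List (List String)) (row : Int) (col : Int) (direction : String) : Prop :=
  (direction = "H" → grid ≠ [] ∧ 0 ≤ row ∧ row < (grid.length : Int) ∧ 0 ≤ col ∧
      (grid.headD []).length ≤ (grid.getD row.toNat []).length) ∧
  (direction = "V" → 0 ≤ row ∧ ∀ r ∈ grid.drop row.toNat, PySem.Raise.InRange r.length col)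
instance (grid : List (List String)) (row : Int) (col : Int) (direction : String) : Decidable (Pre_find_max_word_length_and_existing_letters grid row col direction) := by unfold Pre_find_max_word_length_and_existing_letters; infer_instance

def pvWitness_find_max_word_length_and_existing_letters : List (List String) × Int × Int × String :=
  ([["c", "a", "?"], [".", "b", "x"]], 0, 0, "H")

def Spec_find_max_word_length_and_existing_letters (grid : List (List String)) (row : Int) (col : Int) (direction : String) (out : Int × (List (Int × String))) : Prop := out = find_max_word_length_and_existing_letters_alt grid row col direction
instance (grid : List (List String)) (row : Int) (col : Int) (direction : String) (out : Int × (List (Int × String))) : Decidable (Spec_find_max_word_length_and_existing_letters grid row col direction out) := by unfold Spec_find_max_word_length_and_existing_letters; infer_instance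

-- ===== CLAIM (what is proved, stated in full; the proofs are below) =====
def Claim_equal_find_max_word_length_and_existing_letters : Prop := ∀ (grid : List (List String)) (row : Int) (col : Int) (direction : String), Dom_find_max_word_length_and_existing_letters grid row col direction → Pre_find_max_word_length_and_existing_letters grid row col direction → Spec_find_max_word_length_and_existing_letters grid row col direction (find_max_word_length_and_existing_letters grid row col direction)

-- ===== LEMMAS AND PROOFS =====

theorem pvLoopH_eq_scan (grid : List (List String)) (row col : Int) (rowl : List String)
    (hrow : PySem.List.pyGet? grid row = some rowl)
    (hW : (grid.headD []).length ≤ rowl.length) (hcol : 0 ≤ col) :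
    ∀ (fuel : Nat) (m : Int) (d : PySem.Dict Int String), 0 ≤ m →
      ((grid.headD []).length : Int) - (col + m) ≤ fuel →
      pvLoopH grid row col fuel m d =
        pvScanRay ((rowl.drop (col + m).toNat).take
          (((grid.headD []).length : Int) - (col + m)).toNat) m d := by
  intro fuel
  induction fuel with
  | zero =>
    intro m d hm hfuel
    have h0 : (((grid.headD []).length : Int) - (col + m)).toNat = 0 := by omega
    rw [pvLoopH, h0]
    simp [pvScanRay]
  | succ n ih =>
    intro m d hm hfuel
    by_cases hlt : col + m < ((grid.headD []).length : Int)
    · have hpos : (0:Int) ≤ col + m := by omega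
      have hidx : (col + m).toNat < rowl.length := by omega
      have hcell : pvCell grid row (col + m) = some rowl[(col + m).toNat] := by
        simp only [pvCell, hrow, Option.bind_some]
        rw [PySem.List.pyGet?_of_nonneg rowl hpos, List.getElem?_eq_getElem hidx]
      have hdrop : rowl.drop (col + m).toNat =
          rowl[(col + m).toNat] :: rowl.drop ((col + m).toNat + 1) :=
        (List.getElem_cons_drop hidx).symm
      have htake : (((grid.headD []).length : Int) - (col + m)).toNat =
          ((((grid.headD []).length : Int) - (col + (m + 1))).toNat) + 1 := by omega
      rw [pvLoopH, if_pos hlt, hcell, hdrop, htake]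
      simp only []
      by_cases hdot : rowl[(col + m).toNat] = "."
      · simp [hdot, pvScanRay]
      · rw [if_pos hdot, List.take_succ_cons, pvScanRay, if_neg hdot]
        rw [ih (m + 1) _ (by omega) (by omega)]
        have h1 : (col + (m + 1)).toNat = (col + m).toNat + 1 := by omega
        rw [h1]
    · have h0 : ((((grid.headD []).length : Int)) - (col + m)).toNat = 0 := by omega
      rw [pvLoopH, if_neg hlt, h0]
      simp [pvScanRay]

theorem pvLoopV_eq_scan (grid : List (List String)) (row col : Int)
    (hrow : 0 ≤ row)
    (hcol : ∀ r ∈ grid.drop row.toNat, PySem.Raise.InRange r.length col) :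
    ∀ (fuel : Nat) (m : Int) (d : PySem.Dict Int String), 0 ≤ m →
      (grid.length : Int) - (row + m) ≤ fuel →
      pvLoopV grid row col fuel m d =
        pvScanRay (((PySem.List.pyRange (row + m) grid.length 1).map
          (fun r => (PySem.List.pyGet? grid r).bind (fun rw => PySem.List.pyGet? rw col))).filterMap id) m d := by
  intro fuel
  induction fuel with
  | zero =>
    intro m d hm hfuel
    rw [pvLoopV, PySem.List.pyRange_one_eq_nil (by omega)]
    simp [pvScanRay]
  | succ n ih =>
    intro m d hm hfuel
    by_cases hlt : row + m < (grid.length : Int)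
    · have hpos : (0:Int) ≤ row + m := by omega
      have hidx : (row + m).toNat < grid.length := by omega
      have hrowc : PySem.List.pyGet? grid (row + m) = some grid[(row + m).toNat] := by
        rw [PySem.List.pyGet?_of_nonneg grid hpos, List.getElem?_eq_getElem hidx]
      have hmem : grid[(row + m).toNat] ∈ grid.drop row.toNat := by
        have hi : (row + m).toNat - row.toNat < (grid.drop row.toNat).length := by
          simp only [List.length_drop]; omega
        have heq : (grid.drop row.toNat)[(row + m).toNat - row.toNat]'hi = grid[(row + m).toNat] := by
          rw [List.getElem_drop]
          congr 1
          omega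
        rw [← heq]
        exact List.getElem_mem hi
      obtain ⟨c, hc⟩ : ∃ c, PySem.List.pyGet? grid[(row + m).toNat] col = some c := by
        cases h : PySem.List.pyGet? grid[(row + m).toNat] col with
        | none =>
          exact absurd (hcol _ hmem) ((PySem.List.pyGet?_eq_none_iff _ _).mp h)
        | some c => exact ⟨c, rfl⟩
      have hcell : pvCell grid (row + m) col = some c := by
        simp [pvCell, hrowc, hc]
      rw [pvLoopV, if_pos hlt, hcell, PySem.List.pyRange_one_cons hlt]
      simp only [List.map_cons, hrowc, Option.bind_some, hc, List.filterMap_cons, id_eq]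
      by_cases hdot : c = "."
      · simp [hdot, pvScanRay]
      · rw [if_pos hdot, pvScanRay, if_neg hdot]
        rw [ih (m + 1) _ (by omega) (by omega)]
        have : row + (m + 1) = row + m + 1 := by ring
        rw [this]
        rfl
    · rw [pvLoopV, if_neg hlt, PySem.List.pyRange_one_eq_nil (by omega)]
      simp [pvScanRay]

-- ===== VERDICT (by name: the statement is the Claim_ definition above) =====
theorem find_max_word_length_and_existing_letters_spec : Claim_equal_find_max_word_length_and_existing_letters := by
  intro grid row col direction _ hpre
  obtain ⟨hH, hV⟩ := hpre
  unfold Spec_find_max_word_length_and_existing_letters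
  unfold find_max_word_length_and_existing_letters find_max_word_length_and_existing_letters_alt
  by_cases hd : direction = "H"
  · obtain ⟨hne, hr0, hrlt, hc0, hwide⟩ := hH hd
    have hidx : row.toNat < grid.length := by omega
    have hrow : PySem.List.pyGet? grid row = some grid[row.toNat] := by
      rw [PySem.List.pyGet?_of_nonneg grid hr0, List.getElem?_eq_getElem hidx]
    have hgetD : grid.getD row.toNat [] = grid[row.toNat] := by
      simp [List.getD, List.getElem?_eq_getElem hidx]
    rw [hgetD] at hwide
    simp only [if_pos hd, hrow]
    rw [pvLoopH_eq_scan grid row col grid[row.toNat] hrow hwide hc0 _ 0 PySem.Dict.empty le_rfl (by omega)]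
    rw [PySem.List.slice_toNat grid[row.toNat] hc0 (Int.natCast_nonneg _)]
    have h1 : (col + 0).toNat = col.toNat := by omega
    have h2 : (((grid.headD []).length : Int) - (col + 0)).toNat =
        ((grid.headD []).length : Int).toNat - col.toNat := by omega
    rw [h1, h2]
  · by_cases hv : direction = "V"
    · obtain ⟨hr0, hc⟩ := hV hv
      simp only [if_neg hd, if_pos hv]
      rw [pvLoopV_eq_scan grid row col hr0 hc _ 0 PySem.Dict.empty le_rfl (by omega)]
      have : row + 0 = row := by ring
      rw [this]
    · simp [if_neg hd, if_neg hv]
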